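-- pv_equiv track=rewrite | github.com/integraledelebesgue/quantum-diffusion | packages/quantum-image-encoding/src/quantum_image_encoding/real_ket.py | _morton_code_to_position
-- ===== SOURCE A (Python) =====
-- def _morton_code_to_position(z: int, n_rows: int, n_columns: int) -> tuple[int, int]:
--     """Extract row and col from a Morton code (Z-order index)."""
--
--     row = 0
--     col = 0
--     bit_pos = 0
--
--     for i in range(max(n_rows, n_columns)):
--         if i < n_columns:
--             col |= ((z >> bit_pos) & 1) << i
--             bit_pos += 1
--         if i < n_rows:
--             row |= ((z >> bit_pos) & 1) << i
--             bit_pos += 1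
--
--     return row, col
-- ===== SOURCE B (Python) =====
-- def _morton_code_to_position(z: int, n_rows: int, n_columns: int) -> tuple[int, int]:
--     """Extract row and col from a Morton code (Z-order index).
--
--     Two-phase: deinterleave the low 2*m bits at fixed positions, then copy the
--     contiguous tail bits of the larger dimension.
--     """
--     m = max(min(n_rows, n_columns), 0)
--     row = 0
--     col = 0
--     for i in range(m):
--         col |= ((z >> (2 * i)) & 1) << i
--         row |= ((z >> (2 * i + 1)) & 1) << i
--     if n_columns < n_rows:
--         for i in range(m, n_rows):
--             row |= ((z >> (m + i)) & 1) << i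
--     elif n_rows < n_columns:
--         for i in range(m, n_columns):
--             col |= ((z >> (m + i)) & 1) << i
--     return row, col
-- ===== Notes on version B (the rewrite author's own statement) =====
-- stated objective: alternative
-- what changed: Replaces the single loop that threads a running bit_pos counter with two fixed-position phases: a deinterleave loop over min(n_rows,n_columns) reading bits 2i/2i+1, then one branch on the larger dimension copying the contiguous tail bits at offset m+i.
import Mathlib
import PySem

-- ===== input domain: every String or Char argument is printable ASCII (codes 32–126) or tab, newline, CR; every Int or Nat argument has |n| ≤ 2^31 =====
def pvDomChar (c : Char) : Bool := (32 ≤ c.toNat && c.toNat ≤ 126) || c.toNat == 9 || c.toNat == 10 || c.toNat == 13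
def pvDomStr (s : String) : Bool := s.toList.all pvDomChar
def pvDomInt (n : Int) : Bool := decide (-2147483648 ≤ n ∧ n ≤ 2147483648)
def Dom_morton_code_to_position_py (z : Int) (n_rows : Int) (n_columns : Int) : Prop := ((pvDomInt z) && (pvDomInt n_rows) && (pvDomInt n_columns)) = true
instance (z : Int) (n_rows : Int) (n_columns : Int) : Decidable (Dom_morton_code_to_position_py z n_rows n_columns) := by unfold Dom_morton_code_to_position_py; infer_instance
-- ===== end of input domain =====

-- B replaces A's single loop with a running bit_pos by a fixed-position deinterleave phase plus a contiguous-tail phase (alternative decomposition, same cost).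

-- ===== PORT A =====
-- one iteration of A's loop: state is (row, col, bit_pos)
def mortonStepA (z : Int) (n_rows : Int) (n_columns : Int) (st : Int × Int × Nat) (i : Nat) : Int × Int × Nat :=
  let colbp : Int × Nat :=
    if (i : Int) < n_columns then
      (PySem.Int.bor st.2.1 (PySem.Int.band (z >>> st.2.2) 1 <<< i), st.2.2 + 1)
    else (st.2.1, st.2.2)
  let rowbp : Int × Nat :=
    if (i : Int) < n_rows then
      (PySem.Int.bor st.1 (PySem.Int.band (z >>> colbp.2) 1 <<< i), colbp.2 + 1)
    else (st.1, colbp.2)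
  (rowbp.1, colbp.1, rowbp.2)

def morton_code_to_position_py (z : Int) (n_rows : Int) (n_columns : Int) : Int × Int :=
  let st := (List.range (max n_rows n_columns).toNat).foldl (mortonStepA z n_rows n_columns) (0, 0, 0)
  (st.1, st.2.1)

-- ===== PORT B =====
-- deinterleave phase: col gets bit 2i, row gets bit 2i+1
def mortonPairStep (z : Int) (rc : Int × Int) (i : Nat) : Int × Int :=
  (PySem.Int.bor rc.1 (PySem.Int.band (z >>> (2 * i + 1)) 1 <<< i),
   PySem.Int.bor rc.2 (PySem.Int.band (z >>> (2 * i)) 1 <<< i))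

-- tail phase: bit m+i goes to position i of the larger dimension
def mortonTailStep (z : Int) (m : Nat) (acc : Int) (i : Nat) : Int :=
  PySem.Int.bor acc (PySem.Int.band (z >>> (m + i)) 1 <<< i)

def morton_code_to_position_py_alt (z : Int) (n_rows : Int) (n_columns : Int) : Int × Int :=
  let m := (min n_rows n_columns).toNat
  let rc := (List.range m).foldl (mortonPairStep z) (0, 0)
  if n_columns < n_rows then
    ((List.range' m (n_rows.toNat - m)).foldl (mortonTailStep z m) rc.1, rc.2)
  else if n_rows < n_columns then
    (rc.1, (List.range' m (n_columns.toNat - m)).foldl (mortonTailStep z m) rc.2)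
  else rc

-- ===== PRECONDITION & SPEC =====
def Spec_morton_code_to_position_py (z : Int) (n_rows : Int) (n_columns : Int) (out : Int × Int) : Prop := out = morton_code_to_position_py_alt z n_rows n_columns
instance (z : Int) (n_rows : Int) (n_columns : Int) (out : Int × Int) : Decidable (Spec_morton_code_to_position_py z n_rows n_columns out) := by unfold Spec_morton_code_to_position_py; infer_instance

-- ===== CLAIM (what is proved, stated in full; the proofs are below) =====
def Claim_equal_morton_code_to_position_py : Prop := ∀ (z : Int) (n_rows : Int) (n_columns : Int), Dom_morton_code_to_position_py z n_rows n_columns → Spec_morton_code_to_position_py z n_rows n_columns (morton_code_to_position_py z n_rows n_columns)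

-- ===== LEMMAS AND PROOFS =====

-- Phase 1: for k ≤ min, A's fold over range k equals B's pair fold with bit_pos = 2k.
theorem morton_phase1 (z n_rows n_columns : Int) :
    ∀ k : Nat, k ≤ (min n_rows n_columns).toNat →
    (List.range k).foldl (mortonStepA z n_rows n_columns) (0, 0, 0) =
      (((List.range k).foldl (mortonPairStep z) (0, 0)).1,
       ((List.range k).foldl (mortonPairStep z) (0, 0)).2, 2 * k) := by
  intro k
  induction k with
  | zero => intro _; simp
  | succ k ih =>
    intro hk
    have hk' : k ≤ (min n_rows n_columns).toNat := Nat.le_of_succ_le hk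
    have h1 : min n_rows n_columns ≤ n_columns := min_le_right _ _
    have h2 : min n_rows n_columns ≤ n_rows := min_le_left _ _
    have hkc : (k : Int) < n_columns := by omega
    have hkr : (k : Int) < n_rows := by omega
    rw [List.range_succ, List.foldl_append, List.foldl_append, ih hk']
    simp only [List.foldl_cons, List.foldl_nil, mortonStepA, mortonPairStep,
      if_pos hkc, if_pos hkr]
    refine Prod.ext ?_ (Prod.ext ?_ ?_) <;> (simp; try ring_nf)

-- Tail phase when columns < rows: only the row branch fires, reading bit m+i.
theorem morton_tail_row (z n_rows n_columns : Int) (hc : n_columns < n_rows)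
    (m : Nat) (hm : m = (min n_rows n_columns).toNat) :
    ∀ (t s : Nat) (rr cc : Int), m ≤ s → s + t ≤ n_rows.toNat →
    (List.range' s t).foldl (mortonStepA z n_rows n_columns) (rr, cc, m + s) =
      ((List.range' s t).foldl (mortonTailStep z m) rr, cc, m + s + t) := by
  intro t
  induction t with
  | zero => intro s rr cc _ _; simp
  | succ t ih =>
    intro s rr cc hs ht
    have hmin : min n_rows n_columns = n_columns := min_eq_right (le_of_lt hc)
    have hcs : ¬ ((s : Int) < n_columns) := by
      rw [hmin] at hm; omega
    have hrs : (s : Int) < n_rows := by omega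
    rw [List.range'_succ, List.foldl_cons, List.foldl_cons]
    simp only [mortonStepA, hcs, if_false, hrs, if_true, mortonTailStep]
    have := ih (s + 1) (PySem.Int.bor rr (PySem.Int.band (z >>> (m + s)) 1 <<< s)) cc
      (by omega) (by omega)
    simp only [show m + s + 1 = m + (s + 1) by omega]
    rw [this, show m + (s + 1) + t = m + s + (t + 1) by omega]

-- Tail phase when rows < columns: only the col branch fires, reading bit m+i.
theorem morton_tail_col (z n_rows n_columns : Int) (hr : n_rows < n_columns)
    (m : Nat) (hm : m = (min n_rows n_columns).toNat) :
    ∀ (t s : Nat) (rr cc : Int), m ≤ s → s + t ≤ n_columns.toNat →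
    (List.range' s t).foldl (mortonStepA z n_rows n_columns) (rr, cc, m + s) =
      (rr, (List.range' s t).foldl (mortonTailStep z m) cc, m + s + t) := by
  intro t
  induction t with
  | zero => intro s rr cc _ _; simp
  | succ t ih =>
    intro s rr cc hs ht
    have hmin : min n_rows n_columns = n_rows := min_eq_left (le_of_lt hr)
    have hrs : ¬ ((s : Int) < n_rows) := by
      rw [hmin] at hm; omega
    have hcs : (s : Int) < n_columns := by omega
    rw [List.range'_succ, List.foldl_cons, List.foldl_cons]
    simp only [mortonStepA, hcs, if_true, hrs, if_false, mortonTailStep]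
    have := ih (s + 1) rr (PySem.Int.bor cc (PySem.Int.band (z >>> (m + s)) 1 <<< s))
      (by omega) (by omega)
    simp only [show m + s + 1 = m + (s + 1) by omega]
    rw [this, show m + (s + 1) + t = m + s + (t + 1) by omega]

-- ===== VERDICT (by name: the statement is the Claim_ definition above) =====
theorem morton_code_to_position_py_spec : Claim_equal_morton_code_to_position_py := by
  intro z n_rows n_columns _
  unfold Spec_morton_code_to_position_py morton_code_to_position_py morton_code_to_position_py_alt
  set m := (min n_rows n_columns).toNat with hm
  rcases lt_trichotomy n_columns n_rows with hc | he | hr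
  · -- columns < rows
    have hmax : (max n_rows n_columns).toNat = n_rows.toNat := by
      rw [max_eq_left (le_of_lt hc)]
    have hmle : m ≤ n_rows.toNat := by
      have : min n_rows n_columns ≤ n_rows := min_le_left _ _
      omega
    have hsplit : List.range n_rows.toNat = List.range m ++ List.range' m (n_rows.toNat - m) := by
      have h := List.range'_append_1 (s := 0) (m := m) (n := n_rows.toNat - m)
      simp only [Nat.zero_add, Nat.add_sub_cancel' hmle] at h
      rw [List.range_eq_range', ← h, List.range_eq_range']
    rw [hmax, hsplit, List.foldl_append,
        morton_phase1 z n_rows n_columns m (le_refl m),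
        show 2 * m = m + m by omega,
        morton_tail_row z n_rows n_columns hc m hm (n_rows.toNat - m) m _ _ (le_refl m) (by omega)]
    simp [hc]
  · -- equal: tail empty
    have hmax : (max n_rows n_columns).toNat = m := by rw [he]; simp [hm, he]
    rw [hmax, morton_phase1 z n_rows n_columns m (le_refl m)]
    simp [he]
  · -- rows < columns
    have hmax : (max n_rows n_columns).toNat = n_columns.toNat := by
      rw [max_eq_right (le_of_lt hr)]
    have hmle : m ≤ n_columns.toNat := by
      have : min n_rows n_columns ≤ n_columns := min_le_right _ _
      omega
    have hsplit : List.range n_columns.toNat = List.range m ++ List.range' m (n_columns.toNat - m) := by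
      have h := List.range'_append_1 (s := 0) (m := m) (n := n_columns.toNat - m)
      simp only [Nat.zero_add, Nat.add_sub_cancel' hmle] at h
      rw [List.range_eq_range', ← h, List.range_eq_range']
    rw [hmax, hsplit, List.foldl_append,
        morton_phase1 z n_rows n_columns m (le_refl m),
        show 2 * m = m + m by omega,
        morton_tail_col z n_rows n_columns hr m hm (n_columns.toNat - m) m _ _ (le_refl m) (by omega)]
    simp [hr, not_lt_of_gt hr]
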